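-- pv_equiv track=rewrite | github.com/vito-a/humanitarian_agent | src/report/compose.py | _resolve_global_order
-- ===== SOURCE A (Python) =====
-- from typing import Dict, Any, List, Tuple, Optional
--
-- def _resolve_global_order(bags: dict, titles: List[str]) -> List[str]:
--     want = [str(t).strip() for t in (bags.get("section_order") or []) if str(t).strip()]
--     if not want: return titles
--     seen, ordered = set(), []
--     for t in want:
--         if t in titles and t not in seen:
--             ordered.append(t); seen.add(t)
--     for t in titles:
--         if t not in seen:
--             ordered.append(t); seen.add(t)
--     return ordered
-- ===== SOURCE B (Python) =====
-- def _resolve_global_order(bags: dict, titles):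
--     want = [str(t).strip() for t in (bags.get("section_order") or []) if str(t).strip()]
--     if not want: return titles
--     rank = {}
--     for i, t in enumerate(want):
--         if t not in rank:
--             rank[t] = i
--     deduped = list(dict.fromkeys(titles))
--     return sorted(deduped, key=lambda t: rank.get(t, len(want)))
-- ===== Notes on version B (the rewrite author's own statement) =====
-- stated objective: alternative
-- what changed: Replaces the two seen-set accumulator passes with a rank table (first index of each want entry) plus a stable sort of the deduplicated titles keyed by rank.get(t, len(want)).
import Mathlib
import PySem

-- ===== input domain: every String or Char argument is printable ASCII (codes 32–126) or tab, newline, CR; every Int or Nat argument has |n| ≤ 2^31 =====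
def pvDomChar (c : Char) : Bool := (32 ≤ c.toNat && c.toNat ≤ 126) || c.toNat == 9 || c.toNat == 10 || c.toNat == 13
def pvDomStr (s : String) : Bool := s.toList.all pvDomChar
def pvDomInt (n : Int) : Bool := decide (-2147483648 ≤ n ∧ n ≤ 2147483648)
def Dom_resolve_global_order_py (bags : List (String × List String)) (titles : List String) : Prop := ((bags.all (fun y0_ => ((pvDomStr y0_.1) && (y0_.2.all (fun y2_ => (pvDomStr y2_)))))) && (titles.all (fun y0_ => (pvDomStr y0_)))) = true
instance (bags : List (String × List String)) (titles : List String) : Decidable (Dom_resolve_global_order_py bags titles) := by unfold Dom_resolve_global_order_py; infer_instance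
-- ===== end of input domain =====

-- B replaces A's two seen-set accumulator passes by a first-index rank table plus a
-- stable sort of the deduplicated titles (objective: alternative algorithm, same cost class).

-- ===== PORT A =====
-- literal transliteration of _resolve_global_order: the `want` comprehension, the
-- empty-want guard, then the two accumulator loops over (ordered, seen).
def resolve_global_order_py (bags : List (String × List String)) (titles : List String) : List String :=
  let want := (((PySem.Dict.mk bags).get? "section_order").getD []).filterMap
      (fun t => let s := PySem.Str.strip t; if s = "" then none else some s)
  if want = [] then titles
  else
    let st1 : List String × PySem.Set String := want.foldl
      (fun p t => if titles.contains t && !(PySem.Set.contains p.2 t)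
                  then (p.1 ++ [t], PySem.Set.add p.2 t) else p)
      ([], PySem.Set.empty)
    let st2 : List String × PySem.Set String := titles.foldl
      (fun p t => if !(PySem.Set.contains p.2 t)
                  then (p.1 ++ [t], PySem.Set.add p.2 t) else p) st1
    st2.1

-- ===== PORT B =====
-- transliteration of Source B: same `want` and guard, then the rank dict built over
-- enumerate(want), dict.fromkeys-dedup of titles, and the keyed stable sort.
def resolve_global_order_py_alt (bags : List (String × List String)) (titles : List String) : List String :=
  let want := (((PySem.Dict.mk bags).get? "section_order").getD []).filterMap
      (fun t => let s := PySem.Str.strip t; if s = "" then none else some s)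
  if want = [] then titles
  else
    let rank : PySem.Dict String Int := (PySem.List.enumerate want).foldl
      (fun d p => if d.contains p.2 then d else d.insert p.2 p.1) PySem.Dict.empty
    let deduped := PySem.List.dedup titles
    PySem.List.sorted deduped (fun t => rank.getD t ((want.length : Int))) false

-- ===== PRECONDITION & SPEC =====
def Spec_resolve_global_order_py (bags : List (String × List String)) (titles : List String) (out : List String) : Prop := out = resolve_global_order_py_alt bags titles
instance (bags : List (String × List String)) (titles : List String) (out : List String) : Decidable (Spec_resolve_global_order_py bags titles out) := by unfold Spec_resolve_global_order_py; infer_instance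

-- ===== CLAIM (what is proved, stated in full; the proofs are below) =====
def Claim_equal_resolve_global_order_py : Prop := ∀ (bags : List (String × List String)) (titles : List String), Dom_resolve_global_order_py bags titles → Spec_resolve_global_order_py bags titles (resolve_global_order_py bags titles)

-- ===== LEMMAS AND PROOFS =====

lemma pvOfList_snoc (l : List String) (x : String) :
    PySem.Set.ofList (l ++ [x]) = PySem.Set.add (PySem.Set.ofList l) x := by
  simp [PySem.Set.ofList_eq_foldl, List.foldl_append]

lemma pvContains_true (s : PySem.Set String) (x : String) (h : x ∈ s) :
    PySem.Set.contains s x = true := by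
  simpa [PySem.Set.contains, List.contains_eq_mem] using h

lemma pvContains_false (s : PySem.Set String) (x : String) (h : x ∉ s) :
    PySem.Set.contains s x = false := by
  simpa [PySem.Set.contains, List.contains_eq_mem] using h

lemma pvAdd_of_mem (s : PySem.Set String) (x : String) (h : x ∈ s) :
    PySem.Set.add s x = s := by
  simp [PySem.Set.add, PySem.Set.contains, List.contains_eq_mem, h]

lemma pvAdd_of_not_mem (s : PySem.Set String) (x : String) (h : x ∉ s) :
    PySem.Set.add s x = s ++ [x] := by
  simp [PySem.Set.add, PySem.Set.contains, List.contains_eq_mem, h]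

-- A's first loop: ordered and seen coincide and are the deduped titles-members of the prefix
lemma pvGetD_not (d : PySem.Dict String Int) (t : String) (dflt : Int)
    (h : d.contains t = false) : d.getD t dflt = dflt := by
  rw [PySem.Dict.contains_eq_isSome_get?] at h
  unfold PySem.Dict.getD
  cases hc : d.get? t with
  | none => rfl
  | some v => rw [hc] at h; simp at h

lemma pvLoopA1 (titles : List String) (ws : List String) :
    ws.foldl
      (fun (p : List String × PySem.Set String) t =>
        if titles.contains t && !(PySem.Set.contains p.2 t)
        then (p.1 ++ [t], PySem.Set.add p.2 t) else p)
      ([], PySem.Set.empty)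
    = (PySem.Set.ofList (ws.filter (fun t => titles.contains t)),
       PySem.Set.ofList (ws.filter (fun t => titles.contains t))) := by
  induction ws using List.reverseRecOn with
  | nil => rfl
  | append_singleton ws x ih =>
      rw [List.foldl_append, ih]
      simp only [List.foldl_cons, List.foldl_nil]
      rw [List.filter_append]
      by_cases hx : titles.contains x = true
      · have hxt : x ∈ titles := by simpa [List.contains_eq_mem] using hx
        have hfx : List.filter (fun t => titles.contains t) [x] = [x] := by
          simp [List.contains_eq_mem, hxt]
        rw [hfx, pvOfList_snoc]
        by_cases hm : x ∈ PySem.Set.ofList (List.filter (fun t => titles.contains t) ws)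
        · rw [if_neg (by rw [hx, pvContains_true _ _ hm]; simp)]
          rw [pvAdd_of_mem _ _ hm]
        · rw [if_pos (by rw [hx, pvContains_false _ _ hm]; simp)]
          rw [pvAdd_of_not_mem _ _ hm]
      · have hx0 : titles.contains x = false := by simpa using hx
        have hxt : x ∉ titles := by simpa [List.contains_eq_mem] using hx0
        have hfx : List.filter (fun t => titles.contains t) [x] = [] := by
          simp [List.contains_eq_mem, hxt]
        rw [hfx, List.append_nil]
        rw [if_neg (by rw [hx0]; simp)]

lemma pvMem_update (s : PySem.Set String) (l : List String) (y : String) :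
    y ∈ PySem.Set.update s l ↔ y ∈ s ∨ y ∈ l := by
  induction l using List.reverseRecOn with
  | nil => simp [PySem.Set.update]
  | append_singleton l x ih =>
      have h1 : PySem.Set.update s (l ++ [x]) = PySem.Set.add (PySem.Set.update s l) x := by
        simp [PySem.Set.update, List.foldl_append]
      rw [h1, PySem.Set.mem_add, ih]
      simp; tauto

-- A's second loop from an arbitrary start state
lemma pvLoopA2 (ts : List String) (ord0 : List String) (s0 : PySem.Set String) :
    ts.foldl
      (fun (p : List String × PySem.Set String) t =>
        if !(PySem.Set.contains p.2 t)
        then (p.1 ++ [t], PySem.Set.add p.2 t) else p)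
      (ord0, s0)
    = (ord0 ++ (PySem.Set.ofList ts).filter (fun t => !(PySem.Set.contains s0 t)),
       PySem.Set.update s0 ts) := by
  induction ts using List.reverseRecOn with
  | nil => simp [PySem.Set.update]
  | append_singleton ts x ih =>
      rw [List.foldl_append, ih]
      simp only [List.foldl_cons, List.foldl_nil]
      have hupd : PySem.Set.update s0 (ts ++ [x]) = PySem.Set.add (PySem.Set.update s0 ts) x := by
        simp [PySem.Set.update, List.foldl_append]
      rw [hupd, pvOfList_snoc]
      by_cases hm : x ∈ PySem.Set.update s0 ts
      · rw [if_neg (by rw [pvContains_true _ _ hm]; simp)]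
        rw [pvAdd_of_mem _ _ hm]
        rcases (pvMem_update s0 ts x).mp hm with hs0 | hts
        · by_cases hot : x ∈ PySem.Set.ofList ts
          · rw [pvAdd_of_mem _ _ hot]
          · rw [pvAdd_of_not_mem _ _ hot, List.filter_append]
            have : List.filter (fun t => !(PySem.Set.contains s0 t)) [x] = [] := by
              simp [PySem.Set.contains, List.contains_eq_mem, hs0]
            rw [this, List.append_nil]
        · have hot : x ∈ PySem.Set.ofList ts := (PySem.Set.mem_ofList ts x).mpr hts
          rw [pvAdd_of_mem _ _ hot]
      · rw [if_pos (by rw [pvContains_false _ _ hm]; simp)]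
        have hs0 : x ∉ s0 := fun h => hm ((pvMem_update s0 ts x).mpr (Or.inl h))
        have hts : x ∉ ts := fun h => hm ((pvMem_update s0 ts x).mpr (Or.inr h))
        have hot : x ∉ PySem.Set.ofList ts := fun h => hts ((PySem.Set.mem_ofList ts x).mp h)
        rw [pvAdd_of_not_mem _ _ hot, List.filter_append]
        have : List.filter (fun t => !(PySem.Set.contains s0 t)) [x] = [x] := by
          simp [PySem.Set.contains, List.contains_eq_mem, hs0]
        rw [this, ← List.append_assoc]

-- B's rank dict: getD is the first index in the scanned list (offset k), else the default
lemma pvRank (ws : List String) : ∀ (k : Int) (d : PySem.Dict String Int) (t : String) (dflt : Int),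
    ((PySem.List.enumerate ws k).foldl
        (fun d (p : Int × String) => if d.contains p.2 then d else d.insert p.2 p.1) d).getD t dflt
    = if d.contains t then d.getD t dflt
      else if t ∈ ws then k + (List.idxOf t ws : Int) else dflt := by
  induction ws with
  | nil =>
      intro k d t dflt
      simp only [PySem.List.enumerate, List.foldl_nil, List.not_mem_nil, if_false]
      by_cases hdt : d.contains t = true
      · simp [hdt]
      · have h0 : d.contains t = false := by simpa using hdt
        simp [h0, pvGetD_not d t dflt h0]
  | cons x ws ih =>
      intro k d t dflt
      rw [show PySem.List.enumerate (x :: ws) k = (k, x) :: PySem.List.enumerate ws (k+1) from by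
        simp [PySem.List.enumerate]]
      rw [List.foldl_cons]
      by_cases hdx : d.contains x = true
      · simp only [hdx, if_true]
        rw [ih]
        by_cases hdt : d.contains t = true
        · simp [hdt]
        · have hdt0 : d.contains t = false := by simpa using hdt
          simp only [hdt0, Bool.false_eq_true, if_false]
          have hne : t ≠ x := fun h => by rw [h, hdx] at hdt0; exact absurd hdt0 (by simp)
          simp only [List.mem_cons, hne, false_or]
          by_cases hm : t ∈ ws
          · simp only [hm, if_true]
            rw [List.idxOf_cons]
            have hbx : (x == t) = false := by simp [Ne.symm hne]
            rw [hbx]; simp only [cond_false]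
            push_cast; ring
          · simp [hm]
      · have hdx0 : d.contains x = false := by simpa using hdx
        simp only [hdx0, Bool.false_eq_true, if_false]
        rw [ih]
        by_cases het : t = x
        · subst het
          have h1 : (d.insert t k).contains t = true := by
            simp
          have h2 : (d.insert t k).getD t dflt = k := by
            simp
          simp [h1, h2, hdx0]
        · have h1 : (d.insert x k).contains t = d.contains t := by
            simp [PySem.Dict.contains_insert, het]
          have h2 : (d.insert x k).getD t dflt = d.getD t dflt := by
            simp [PySem.Dict.getD_insert, het]
          rw [h1, h2]
          by_cases hdt : d.contains t = true
          · simp [hdt]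
          · have hdt0 : d.contains t = false := by simpa using hdt
            simp only [hdt0, Bool.false_eq_true, if_false, List.mem_cons, het, false_or]
            by_cases hm : t ∈ ws
            · simp only [hm, if_true]
              rw [List.idxOf_cons]
              have hbx : (x == t) = false := by simp [Ne.symm het]
              rw [hbx]; simp only [cond_false]
              push_cast; ring
            · simp [hm]

-- inserting before everything in M commutes with the append
lemma pvInsertBy_append (before : String → String → Bool) (x : String) :
    ∀ (L M : List String), (∀ y ∈ M, before x y = true) →
    PySem.List.insertBy before x (L ++ M) = PySem.List.insertBy before x L ++ M := by
  intro L
  induction L with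
  | nil =>
      intro M h
      cases M with
      | nil => simp
      | cons m M' => simp [PySem.List.insertBy, h m (by simp)]
  | cons l L' ih =>
      intro M h
      by_cases hb : before x l = true
      · simp [PySem.List.insertBy, hb]
      · simp [PySem.List.insertBy, hb, ih M h]

lemma pvSorted_snoc (D : List String) (x : String) (key : String → Int) :
    PySem.List.sorted (D ++ [x]) key
    = PySem.List.insertBy (fun a b => decide (key a < key b)) x (PySem.List.sorted D key) := by
  rw [PySem.List.sorted_eq_foldl_insertBy, PySem.List.sorted_eq_foldl_insertBy, List.foldl_append]
  rfl

-- the stable sort splits into the below-n part (sorted) and the at-n part (original order)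
lemma pvSorted_split (key : String → Int) (n : Int) : ∀ (D : List String),
    (∀ t ∈ D, key t ≤ n) →
    PySem.List.sorted D key
    = PySem.List.sorted (D.filter (fun t => decide (key t < n))) key
      ++ D.filter (fun t => !decide (key t < n)) := by
  intro D
  induction D using List.reverseRecOn with
  | nil => intro _; rfl
  | append_singleton D x ih =>
      intro hle
      have hleD : ∀ t ∈ D, key t ≤ n := fun t ht => hle t (by simp [ht])
      rw [pvSorted_snoc, ih hleD]
      by_cases hx : key x < n
      · have hM : ∀ y ∈ D.filter (fun t => !decide (key t < n)),
            (fun a b => decide (key a < key b)) x y = true := by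
          intro y hy
          simp only [List.mem_filter, Bool.not_eq_true', decide_eq_false_iff_not, not_lt] at hy
          simp [lt_of_lt_of_le hx hy.2]
        rw [pvInsertBy_append _ _ _ _ hM, ← pvSorted_snoc]
        have h1 : (D ++ [x]).filter (fun t => decide (key t < n))
            = D.filter (fun t => decide (key t < n)) ++ [x] := by
          simp [List.filter_append, hx]
        have h2 : (D ++ [x]).filter (fun t => !decide (key t < n))
            = D.filter (fun t => !decide (key t < n)) := by
          simp [List.filter_append, hx]
        rw [h1, h2]
      · have hall : ∀ y ∈ PySem.List.sorted (D.filter (fun t => decide (key t < n))) key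
              ++ D.filter (fun t => !decide (key t < n)),
            (fun a b => decide (key a < key b)) x y = false := by
          intro y hy
          have hxk : n ≤ key x := not_lt.mp hx
          have hyn : key y ≤ n := by
            rcases List.mem_append.mp hy with hy' | hy'
            · have := (List.mem_filter.mp ((PySem.List.mem_sorted _ _ _ _).mp hy')).2
              exact le_of_lt (decide_eq_true_eq.mp this)
            · exact hleD y (List.mem_filter.mp hy').1
          simp [not_lt.mpr (le_trans hyn hxk)]
        rw [PySem.List.insertBy_of_forall_not_before _ _ _ hall]
        have h1 : (D ++ [x]).filter (fun t => decide (key t < n))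
            = D.filter (fun t => decide (key t < n)) := by
          simp [List.filter_append, hx]
        have h2 : (D ++ [x]).filter (fun t => !decide (key t < n))
            = D.filter (fun t => !decide (key t < n)) ++ [x] := by
          simp [List.filter_append, hx]
        rw [h1, h2, List.append_assoc]

-- ofList lists first occurrences in first-index order
lemma pvPair_idxOf (ws : List String) :
    List.Pairwise (fun a b => List.idxOf a ws < List.idxOf b ws) (PySem.Set.ofList ws) := by
  induction ws using List.reverseRecOn with
  | nil => simp [PySem.Set.ofList]
  | append_singleton ws x ih =>
      rw [pvOfList_snoc]
      have hmem : ∀ a ∈ PySem.Set.ofList ws, a ∈ ws := fun a ha => (PySem.Set.mem_ofList ws a).mp ha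
      have hidx : ∀ a ∈ PySem.Set.ofList ws, List.idxOf a (ws ++ [x]) = List.idxOf a ws := by
        intro a ha; rw [List.idxOf_append]; simp [hmem a ha]
      by_cases hx : x ∈ ws
      · rw [pvAdd_of_mem _ _ ((PySem.Set.mem_ofList ws x).mpr hx)]
        exact List.Pairwise.imp_of_mem
          (fun {a b} ha hb h => by rw [hidx a ha, hidx b hb]; exact h) ih
      · have hnm : x ∉ PySem.Set.ofList ws := fun h => hx (hmem x h)
        rw [pvAdd_of_not_mem _ _ hnm]
        rw [List.pairwise_append]
        refine ⟨List.Pairwise.imp_of_mem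
          (fun {a b} ha hb h => by rw [hidx a ha, hidx b hb]; exact h) ih, by simp, ?_⟩
        intro a ha b hb
        rw [List.mem_singleton] at hb
        rw [hb, hidx a ha]
        have hxidx : List.idxOf x (ws ++ [x]) = ws.length := by
          rw [List.idxOf_append]; simp [hx]
        rw [hxidx]
        exact List.idxOf_lt_length_of_mem (hmem a ha)

-- ofList commutes with filter
lemma pvOfList_filter (p : String → Bool) (ws : List String) :
    PySem.Set.ofList (ws.filter p) = (PySem.Set.ofList ws).filter p := by
  induction ws using List.reverseRecOn with
  | nil => rfl
  | append_singleton ws x ih =>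
      rw [List.filter_append, pvOfList_snoc]
      by_cases hp : p x = true
      · have hfx : List.filter p [x] = [x] := by simp [hp]
        rw [hfx, pvOfList_snoc]
        by_cases hx : x ∈ ws
        · have h1 : x ∈ PySem.Set.ofList (List.filter p ws) := by
            rw [PySem.Set.mem_ofList, List.mem_filter]; exact ⟨hx, hp⟩
          rw [pvAdd_of_mem _ _ h1, pvAdd_of_mem _ _ ((PySem.Set.mem_ofList ws x).mpr hx), ih]
        · have h2 : x ∉ PySem.Set.ofList ws := fun h => hx ((PySem.Set.mem_ofList ws x).mp h)
          have h1 : x ∉ PySem.Set.ofList (List.filter p ws) := by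
            rw [PySem.Set.mem_ofList, List.mem_filter]; intro h; exact hx h.1
          rw [pvAdd_of_not_mem _ _ h1, pvAdd_of_not_mem _ _ h2, ih, List.filter_append, hfx]
      · have hp0 : p x = false := by simpa using hp
        have hfx : List.filter p [x] = [] := by simp [hp0]
        rw [hfx, List.append_nil, ih]
        by_cases hx : x ∈ ws
        · rw [pvAdd_of_mem _ _ ((PySem.Set.mem_ofList ws x).mpr hx)]
        · rw [pvAdd_of_not_mem _ _ (fun h => hx ((PySem.Set.mem_ofList ws x).mp h))]
          rw [List.filter_append]
          have : List.filter p [x] = [] := by simp [hp0]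
          rw [this, List.append_nil]

-- the central equality, for the nonempty-want branch
lemma pvMain (want titles : List String) :
    (titles.foldl
      (fun (p : List String × PySem.Set String) t =>
        if !(PySem.Set.contains p.2 t)
        then (p.1 ++ [t], PySem.Set.add p.2 t) else p)
      (want.foldl
        (fun (p : List String × PySem.Set String) t =>
          if titles.contains t && !(PySem.Set.contains p.2 t)
          then (p.1 ++ [t], PySem.Set.add p.2 t) else p)
        ([], PySem.Set.empty))).1
    = PySem.List.sorted (PySem.List.dedup titles)
        (fun t => ((PySem.List.enumerate want).foldl
          (fun d (p : Int × String) => if d.contains p.2 then d else d.insert p.2 p.1)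
          PySem.Dict.empty).getD t ((want.length : Int))) := by
  rw [pvLoopA1, pvLoopA2]
  have hkey : (fun t => ((PySem.List.enumerate want).foldl
          (fun d (p : Int × String) => if d.contains p.2 then d else d.insert p.2 p.1)
          PySem.Dict.empty).getD t ((want.length : Int)))
      = (fun t => if t ∈ want then ((List.idxOf t want : Nat) : Int) else (want.length : Int)) := by
    funext t
    rw [pvRank]
    simp [PySem.Dict.contains_empty]
  rw [hkey, PySem.List.dedup_eq_ofList]
  set key : String → Int := fun t => if t ∈ want then ((List.idxOf t want : Nat) : Int) else (want.length : Int) with hkeydef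
  have hle : ∀ t ∈ PySem.Set.ofList titles, key t ≤ (want.length : Int) := by
    intro t _
    by_cases h : t ∈ want
    · simp only [hkeydef, h, if_true]
      exact_mod_cast le_of_lt (List.idxOf_lt_length_of_mem h)
    · simp [hkeydef, h]
  rw [pvSorted_split key (want.length : Int) _ hle]
  have hkeylt : ∀ t, (decide (key t < (want.length : Int))) = want.contains t := by
    intro t
    by_cases h : t ∈ want
    · have : key t < (want.length : Int) := by
        simp only [hkeydef, h, if_true]
        exact_mod_cast List.idxOf_lt_length_of_mem h
      simp [this, List.contains_eq_mem, h]
    · have : ¬ key t < (want.length : Int) := by simp [hkeydef, h]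
      simp [this, List.contains_eq_mem, h]
  have hsecond : (PySem.Set.ofList titles).filter (fun t => !decide (key t < (want.length : Int)))
      = (PySem.Set.ofList titles).filter
          (fun t => !(PySem.Set.contains (PySem.Set.ofList (want.filter (fun u => titles.contains u))) t)) := by
    apply List.filter_congr
    intro t ht
    have htt : t ∈ titles := (PySem.Set.mem_ofList titles t).mp ht
    rw [hkeylt t]
    congr 1
    by_cases h : t ∈ want
    · rw [pvContains_true]
      · simp [List.contains_eq_mem, h]
      · rw [PySem.Set.mem_ofList, List.mem_filter]
        exact ⟨h, by simp [List.contains_eq_mem, htt]⟩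
    · rw [pvContains_false]
      · simp [List.contains_eq_mem, h]
      · rw [PySem.Set.mem_ofList, List.mem_filter]
        intro hc; exact h hc.1
  have hfirst : PySem.List.sorted
        ((PySem.Set.ofList titles).filter (fun t => decide (key t < (want.length : Int)))) key
      = PySem.Set.ofList (want.filter (fun u => titles.contains u)) := by
    apply PySem.List.sorted_eq_of_perm_of_pairwise_lt
    · rw [List.perm_ext_iff_of_nodup (PySem.Set.nodup_ofList _)
        (List.Nodup.filter _ (PySem.Set.nodup_ofList _))]
      intro a
      simp only [PySem.Set.mem_ofList, List.mem_filter, hkeylt a, List.contains_eq_mem,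
        decide_eq_true_eq]
      tauto
    · have hp : List.Pairwise (fun a b => List.idxOf a want < List.idxOf b want)
          (PySem.Set.ofList (want.filter (fun u => titles.contains u))) := by
        rw [pvOfList_filter]
        exact List.Pairwise.sublist (List.filter_sublist) (pvPair_idxOf want)
      refine List.Pairwise.imp_of_mem ?_ hp
      intro a b ha hb h
      have haw : a ∈ want := by
        have := (PySem.Set.mem_ofList _ a).mp ha
        exact (List.mem_filter.mp this).1
      have hbw : b ∈ want := by
        have := (PySem.Set.mem_ofList _ b).mp hb
        exact (List.mem_filter.mp this).1
      simp only [hkeydef, haw, hbw, if_true]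
      exact_mod_cast h
  rw [hsecond, hfirst]

-- ===== VERDICT (by name: the statement is the Claim_ definition above) =====
theorem resolve_global_order_py_spec : Claim_equal_resolve_global_order_py := by
  intro bags titles _
  unfold Spec_resolve_global_order_py resolve_global_order_py resolve_global_order_py_alt
  set want := (((PySem.Dict.mk bags).get? "section_order").getD []).filterMap
      (fun t => let s := PySem.Str.strip t; if s = "" then none else some s) with hwant
  by_cases hw : want = []
  · simp only [hw, if_true]
  · simp only [if_neg hw]
    exact pvMain want titles
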